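-- pv_equiv track=rewrite | github.com/jane264/universal_scraper | core/utils.py | analyze_page_structure
-- ===== SOURCE A (Python) =====
-- def analyze_page_structure(raw_data):
--     has_text = any(d.get("text") for d in raw_data)
--     has_links = any(d.get("href") for d in raw_data)
--     has_images = any(d.get("src") for d in raw_data)
--
--     options = []
--     if has_text:
--         options.append("Text Content")
--     if has_links:
--         options.append("Links")
--     if has_images:
--         options.append("Images")
--
--     return options
-- ===== SOURCE B (Python) =====
-- def analyze_page_structure(raw_data):
--     has_text = has_links = has_images = False
--     for d in raw_data:
--         if not has_text and d.get("text"):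
--             has_text = True
--         if not has_links and d.get("href"):
--             has_links = True
--         if not has_images and d.get("src"):
--             has_images = True
--         if has_text and has_links and has_images:
--             break
--     options = []
--     if has_text:
--         options.append("Text Content")
--     if has_links:
--         options.append("Links")
--     if has_images:
--         options.append("Images")
--     return options
-- ===== Notes on version B (the rewrite author's own statement) =====
-- stated objective: alternative
-- what changed: Replaces three separate any() scans over raw_data with a single stateful pass maintaining three boolean flags, breaking early once all three are set.
import Mathlib
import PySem

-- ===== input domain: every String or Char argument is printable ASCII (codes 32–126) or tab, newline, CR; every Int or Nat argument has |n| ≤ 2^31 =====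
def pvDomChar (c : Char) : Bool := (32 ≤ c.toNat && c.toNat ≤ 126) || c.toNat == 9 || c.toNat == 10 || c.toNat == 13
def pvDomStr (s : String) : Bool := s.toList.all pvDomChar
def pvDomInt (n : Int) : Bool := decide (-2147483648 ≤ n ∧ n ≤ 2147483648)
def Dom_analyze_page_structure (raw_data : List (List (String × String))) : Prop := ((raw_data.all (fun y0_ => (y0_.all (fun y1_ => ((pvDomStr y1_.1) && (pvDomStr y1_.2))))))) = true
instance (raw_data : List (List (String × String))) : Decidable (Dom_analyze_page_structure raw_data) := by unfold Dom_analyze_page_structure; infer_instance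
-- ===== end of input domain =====

-- B replaces A's three separate any() scans with ONE pass keeping three flags and an
-- early break once all are set (objective: alternative decomposition; return value only).

-- shared helper: truthiness of d.get(k) — first-match association-list lookup,
-- truthy iff present with a non-empty string value
def pyGetTruthy (d : List (String × String)) (k : String) : Bool :=
  match List.lookup k d with
  | none => false
  | some s => s != ""

-- ===== PORT A =====
def analyze_page_structure (raw_data : List (List (String × String))) : List String :=
  let has_text := raw_data.any (fun d => pyGetTruthy d "text")
  let has_links := raw_data.any (fun d => pyGetTruthy d "href")
  let has_images := raw_data.any (fun d => pyGetTruthy d "src")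
  (if has_text then ["Text Content"] else []) ++
  (if has_links then ["Links"] else []) ++
  (if has_images then ["Images"] else [])

-- ===== PORT B =====
-- the single stateful pass of Source B: three flags, break when all set
def apsLoop : List (List (String × String)) → Bool → Bool → Bool → Bool × Bool × Bool
  | [], t, l, i => (t, l, i)
  | d :: rest, t, l, i =>
    let t' := if !t && pyGetTruthy d "text" then true else t
    let l' := if !l && pyGetTruthy d "href" then true else l
    let i' := if !i && pyGetTruthy d "src" then true else i
    if t' && l' && i' then (t', l', i') else apsLoop rest t' l' i'

def analyze_page_structure_alt (raw_data : List (List (String × String))) : List String :=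
  let r := apsLoop raw_data false false false
  (if r.1 then ["Text Content"] else []) ++
  (if r.2.1 then ["Links"] else []) ++
  (if r.2.2 then ["Images"] else [])

-- ===== PRECONDITION & SPEC =====
def Spec_analyze_page_structure (raw_data : List (List (String × String))) (out : List String) : Prop := out = analyze_page_structure_alt raw_data
instance (raw_data : List (List (String × String))) (out : List String) : Decidable (Spec_analyze_page_structure raw_data out) := by unfold Spec_analyze_page_structure; infer_instance

-- ===== CLAIM (what is proved, stated in full; the proofs are below) =====
def Claim_equal_analyze_page_structure : Prop := ∀ (raw_data : List (List (String × String))), Dom_analyze_page_structure raw_data → Spec_analyze_page_structure raw_data (analyze_page_structure raw_data)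

-- ===== LEMMAS AND PROOFS =====

theorem ite_flag_eq_or (t p : Bool) : (if !t && p then true else t) = (t || p) := by
  cases t <;> cases p <;> rfl

theorem apsLoop_eq_any (xs : List (List (String × String))) (t l i : Bool) :
    apsLoop xs t l i =
      (t || xs.any (fun d => pyGetTruthy d "text"),
       l || xs.any (fun d => pyGetTruthy d "href"),
       i || xs.any (fun d => pyGetTruthy d "src")) := by
  induction xs generalizing t l i with
  | nil => simp [apsLoop]
  | cons d rest ih =>
    simp only [apsLoop, ite_flag_eq_or, List.any_cons, ← Bool.or_assoc]
    split
    · rename_i h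
      simp only [Bool.and_eq_true] at h
      obtain ⟨⟨ht, hl⟩, hi⟩ := h
      simp [ht, hl, hi]
    · exact ih _ _ _

-- ===== VERDICT (by name: the statement is the Claim_ definition above) =====
theorem analyze_page_structure_spec : Claim_equal_analyze_page_structure := by
  intro raw_data _
  unfold Spec_analyze_page_structure analyze_page_structure analyze_page_structure_alt
  rw [apsLoop_eq_any]
  simp
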